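-- pv_equiv track=rewrite | github.com/seatedSinger/GoogleKickStart | Round E/longest.py | func
-- ===== SOURCE A (Python) =====
-- def func(A):
--     if len(A) <= 1:
--         return 0
--     gCount = 0
--     curDiff = 0
--     curCount = 0
--     for i in range(1, len(A)):
--         diff = A[i] - A[i-1]
--         if diff == curDiff:
--             curCount += 1
--         else:
--             curDiff = diff
--             curCount = 1
--         gCount = max(gCount, curCount)
--     return gCount + 1
-- ===== SOURCE B (Python) =====
-- def func(A):
--     if len(A) <= 1:
--         return 0
--     d = [y - x for x, y in zip(A, A[1:])]
--     cuts = [0] + [k + 1 for k, (p, q) in enumerate(zip(d, d[1:])) if p != q] + [len(d)]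
--     return max(b - a for a, b in zip(cuts, cuts[1:])) + 1
-- ===== Notes on version B (the rewrite author's own statement) =====
-- stated objective: alternative
-- what changed: B computes the difference list, then the sorted list of break positions (indices where adjacent differences disagree, via enumerate/zip/filter) bracketed by 0 and len, and returns the maximum gap between consecutive break positions plus 1 - no running counter or per-element state machine as in A.
import Mathlib
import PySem

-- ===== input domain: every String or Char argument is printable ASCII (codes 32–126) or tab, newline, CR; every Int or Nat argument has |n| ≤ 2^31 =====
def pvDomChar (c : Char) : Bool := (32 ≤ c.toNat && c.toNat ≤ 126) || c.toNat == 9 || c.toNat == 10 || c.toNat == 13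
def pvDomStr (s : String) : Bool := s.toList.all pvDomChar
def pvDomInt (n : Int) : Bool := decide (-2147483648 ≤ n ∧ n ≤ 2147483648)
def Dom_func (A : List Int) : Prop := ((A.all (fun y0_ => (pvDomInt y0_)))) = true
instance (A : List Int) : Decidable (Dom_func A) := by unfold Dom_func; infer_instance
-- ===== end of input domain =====

-- B replaces A's running-counter state machine by a staged pipeline: difference list,
-- then the list of break positions (bracketed by 0 and len), then the maximum gap
-- between consecutive break positions, plus 1.  Proven equal everywhere (both total).

-- ===== PORT A =====
-- A[i] is always in range on the indices traversed, so pyGetD with default 0 is exact.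
def func (A : List Int) : Int :=
  if A.length ≤ 1 then 0
  else
    let st := (PySem.List.pyRange 1 (A.length : Int) 1).foldl
      (fun (s : Int × Int × Int) (i : Int) =>
        let diff := PySem.List.pyGetD A i 0 - PySem.List.pyGetD A (i - 1) 0
        if diff = s.2.1 then (max s.1 (s.2.2 + 1), s.2.1, s.2.2 + 1)
        else (max s.1 1, diff, 1))
      (0, 0, 0)
    st.1 + 1

-- ===== PORT B =====
-- transliteration of Source B: difference list via zip, break positions via
-- enumerate/zip/filter, answer = max gap between consecutive cuts + 1.
-- The gap list is nonempty (cuts has ≥ 2 elements when len(A) ≥ 2), so Python's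
-- max never raises and .getD 0 is exact.
def func_alt (A : List Int) : Int :=
  if A.length ≤ 1 then 0
  else
    let d := (A.zip (PySem.List.slice A (some 1) none)).map (fun p => p.2 - p.1)
    let cuts : List Int :=
      0 :: ((PySem.List.enumerate (d.zip (PySem.List.slice d (some 1) none)) 0).filter
              (fun p => p.2.1 != p.2.2)).map (fun p => p.1 + 1)
         ++ [(d.length : Int)]
    (PySem.List.max? ((cuts.zip (PySem.List.slice cuts (some 1) none)).map
        (fun p => p.2 - p.1)) (fun y => y)).getD 0 + 1

-- ===== PRECONDITION & SPEC =====
def Spec_func (A : List Int) (out : Int) : Prop := out = func_alt A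
instance (A : List Int) (out : Int) : Decidable (Spec_func A out) := by unfold Spec_func; infer_instance

-- ===== CLAIM (what is proved, stated in full; the proofs are below) =====
def Claim_equal_func : Prop := ∀ (A : List Int), Dom_func A → Spec_func A (func A)

-- ===== LEMMAS AND PROOFS =====

-- length of the maximal leading run of elements equal to x
def runLen (x : Int) : List Int → Nat
  | [] => 0
  | y :: ys => if y = x then runLen x ys + 1 else 0

-- proof-side value: longest run of equal adjacent elements, consumed run by run
def maxRun : List Int → Int
  | [] => 0
  | x :: xs => max (1 + (runLen x xs : Int)) (maxRun (xs.drop (runLen x xs)))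
termination_by d => d.length
decreasing_by simp

theorem maxRun_cons (x : Int) (xs : List Int) :
    maxRun (x :: xs) = max (1 + (runLen x xs : Int)) (maxRun (xs.drop (runLen x xs))) := by
  rw [maxRun]

theorem maxRun_nonneg (d : List Int) : 0 ≤ maxRun d := by
  fun_induction maxRun with
  | case1 => omega
  | case2 x xs ih => omega

abbrev aStep : Int × Int × Int → Int → Int × Int × Int := fun s x =>
  if x = s.2.1 then (max s.1 (s.2.2 + 1), s.2.1, s.2.2 + 1)
  else (max s.1 1, x, 1)

theorem foldl_aStep (d : List Int) : ∀ (g cd cc : Int), 0 ≤ cc → cc ≤ g →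
    (d.foldl aStep (g, cd, cc)).1
      = max g (max (cc + (runLen cd d : Int)) (maxRun (d.drop (runLen cd d)))) := by
  induction d with
  | nil => intro g cd cc h0 h; simp [runLen, maxRun]; omega
  | cons x xs ih =>
    intro g cd cc h0 h
    by_cases hx : x = cd
    · subst hx
      simp only [List.foldl_cons, aStep, if_true]
      rw [ih (max g (cc + 1)) x (cc + 1) (by omega) (le_max_right g (cc + 1)), runLen, if_pos rfl]
      have := maxRun_nonneg ((x :: xs).drop (runLen x xs + 1))
      simp only [List.drop_succ_cons] at *
      push_cast
      omega
    · simp only [List.foldl_cons, aStep, if_neg hx]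
      rw [ih (max g 1) x 1 (by norm_num) (le_max_right g 1), runLen, if_neg hx]
      simp only [Nat.cast_zero, List.drop_zero]
      rw [maxRun_cons]
      omega

theorem init_run (d : List Int) :
    max 0 (max ((0 : Int) + (runLen 0 d : Int)) (maxRun (d.drop (runLen 0 d)))) = maxRun d := by
  cases d with
  | nil => simp [runLen, maxRun]
  | cons x xs =>
    by_cases hx : x = 0
    · subst hx
      rw [runLen, if_pos rfl, maxRun_cons]
      have h1 := maxRun_nonneg (xs.drop (runLen 0 xs))
      simp only [List.drop_succ_cons]
      push_cast
      omega
    · rw [runLen, if_neg hx]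
      have h2 := maxRun_nonneg (x :: xs)
      simp only [Nat.cast_zero, List.drop_zero]
      omega

-- B-side proof machinery ------------------------------------------------------

-- break positions of the difference list, with running offset s
def brkAux : List Int → Int → List Int
  | x :: y :: t, s => (if x ≠ y then [s + 1] else []) ++ brkAux (y :: t) (s + 1)
  | _, _ => []

def gapsOf (c : List Int) : List Int := (c.zip c.tail).map (fun p => p.2 - p.1)

def mxOf : List Int → Int
  | [] => 0
  | g :: gs => gs.foldl max g

theorem bridge (d : List Int) : ∀ s : Int,
    ((PySem.List.enumerate (d.zip d.tail) s).filter (fun p => p.2.1 != p.2.2)).map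
      (fun p => p.1 + 1) = brkAux d s := by
  induction d with
  | nil => intro s; simp [brkAux]
  | cons x t ih =>
    intro s
    cases t with
    | nil => simp [brkAux]
    | cons y tt =>
      simp only [List.tail_cons, List.zip_cons_cons, PySem.List.enumerate_cons,
        List.filter_cons] at *
      rw [brkAux]
      by_cases hxy : x = y
      · subst hxy
        simp only [bne_self_eq_false, ne_eq, not_true_eq_false, if_false, List.nil_append]
        exact ih (s + 1)
      · simp only [bne_iff_ne, ne_eq, hxy, not_false_eq_true, if_true,
          List.map_cons, List.cons_append, List.nil_append]
        rw [ih (s + 1)]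

theorem runLen_le (x : Int) (xs : List Int) : runLen x xs ≤ xs.length := by
  induction xs with
  | nil => simp [runLen]
  | cons y ys ih =>
    rw [runLen]
    split <;> simp
    omega

theorem drop_head_ne (xs : List Int) (x z : Int) (zs : List Int)
    (h : xs.drop (runLen x xs) = z :: zs) : z ≠ x := by
  induction xs generalizing z zs with
  | nil => simp at h
  | cons y ys ih =>
    rw [runLen] at h
    by_cases hy : y = x
    · rw [if_pos hy, List.drop_succ_cons] at h
      exact ih z zs h
    · rw [if_neg hy, List.drop_zero] at h
      cases h; exact hy

theorem brk_run (xs : List Int) : ∀ (x : Int) (s : Int),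
    brkAux (x :: xs) s = brkAux (x :: xs.drop (runLen x xs)) (s + (runLen x xs : Int)) := by
  induction xs with
  | nil => intro x s; simp [runLen]
  | cons y ys ih =>
    intro x s
    by_cases hy : y = x
    · subst hy
      rw [runLen, if_pos rfl, List.drop_succ_cons]
      rw [brkAux]
      simp only [ne_eq, not_true_eq_false, if_false, List.nil_append]
      rw [ih y (s + 1)]
      congr 1
      push_cast
      ring
    · rw [runLen, if_neg hy, List.drop_zero]
      simp

theorem fold_max_comm (t : List Int) : ∀ a b : Int,
    t.foldl max (max a b) = max a (t.foldl max b) := by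
  induction t with
  | nil => intro a b; rfl
  | cons c t ih =>
    intro a b
    simp only [List.foldl_cons]
    rw [max_assoc, ih]

theorem mxOf_cons (a b : Int) (t : List Int) :
    mxOf (a :: b :: t) = max a (mxOf (b :: t)) := by
  rw [mxOf, mxOf, List.foldl_cons]
  exact fold_max_comm t a b

theorem G (n : Nat) : ∀ (x : Int) (xs : List Int), xs.length ≤ n → ∀ s : Int,
    mxOf (gapsOf (s :: brkAux (x :: xs) s ++ [s + ((x :: xs).length : Int)]))
      = maxRun (x :: xs) := by
  induction n with
  | zero =>
    intro x xs hlen s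
    have hxs : xs = [] := List.eq_nil_of_length_eq_zero (Nat.le_zero.mp hlen)
    subst hxs
    simp [brkAux, gapsOf, mxOf, maxRun_cons, runLen, maxRun]
  | succ n ih =>
    intro x xs hlen s
    rw [brk_run xs x s]
    have hr := runLen_le x xs
    cases hrest : xs.drop (runLen x xs) with
    | nil =>
      have hlx : xs.length = runLen x xs := by
        have := List.length_drop (l := xs) (i := runLen x xs)
        rw [hrest] at this; simp at this; omega
      simp only [brkAux]
      rw [List.singleton_append]
      have : gapsOf [s, s + ((x :: xs).length : Int)]
          = [s + ((x :: xs).length : Int) - s] := rfl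
      rw [this]
      rw [maxRun_cons, hrest]
      simp only [mxOf, List.foldl_nil, maxRun, List.length_cons, hlx]
      push_cast
      omega
    | cons z zs =>
      have hzx : z ≠ x := drop_head_ne xs x z zs hrest
      have hlen2 : xs.length = runLen x xs + (zs.length + 1) := by
        have := List.length_drop (l := xs) (i := runLen x xs)
        rw [hrest] at this; simp at this; omega
      rw [brkAux, if_pos (fun he => hzx he.symm)]
      have hend : s + ((x :: xs).length : Int)
          = (s + (runLen x xs : Int) + 1) + ((z :: zs).length : Int) := by
        simp only [List.length_cons, hlen2]
        push_cast
        ring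
      rw [hend]
      set s' : Int := s + (runLen x xs : Int) + 1 with hs'
      have hcuts : (s :: ([s'] ++ brkAux (z :: zs) s') ++ [s' + ((z :: zs).length : Int)])
          = s :: s' :: (brkAux (z :: zs) s' ++ [s' + ((z :: zs).length : Int)]) := by
        simp
      rw [hcuts]
      have hgap1 : gapsOf (s :: s' :: (brkAux (z :: zs) s' ++ [s' + ((z :: zs).length : Int)]))
          = (s' - s) :: gapsOf (s' :: (brkAux (z :: zs) s' ++ [s' + ((z :: zs).length : Int)])) := rfl
      rw [hgap1]
      obtain ⟨w, l', hR⟩ : ∃ w l', brkAux (z :: zs) s' ++ [s' + ((z :: zs).length : Int)] = w :: l' := by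
        cases hB : brkAux (z :: zs) s' ++ [s' + ((z :: zs).length : Int)] with
        | nil => simp at hB
        | cons w l' => exact ⟨w, l', rfl⟩
      have hgapne : gapsOf (s' :: (brkAux (z :: zs) s' ++ [s' + ((z :: zs).length : Int)]))
          = (w - s') :: gapsOf (w :: l') := by rw [hR]; rfl
      have hmx : mxOf ((s' - s) :: gapsOf (s' :: (brkAux (z :: zs) s' ++ [s' + ((z :: zs).length : Int)])))
          = max (s' - s) (mxOf (gapsOf (s' :: (brkAux (z :: zs) s' ++ [s' + ((z :: zs).length : Int)])))) := by
        rw [hgapne]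
        exact mxOf_cons _ _ _
      rw [hmx]
      have hih := ih z zs (by omega) s'
      have hlistsh : (s' :: brkAux (z :: zs) s' ++ [s' + ((z :: zs).length : Int)])
          = s' :: (brkAux (z :: zs) s' ++ [s' + ((z :: zs).length : Int)]) := by simp
      rw [hlistsh] at hih
      rw [hih]
      conv_rhs => rw [maxRun_cons]
      rw [hrest]
      have h1 := maxRun_nonneg (z :: zs)
      have hs2 : s' - s = (runLen x xs : Int) + 1 := by rw [hs']; ring
      omega

-- the difference list computed by A's indexed loop equals B's zip version
theorem dl_eq (A : List Int) (h : 1 ≤ A.length) :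
    List.map (fun k : Nat => PySem.List.pyGetD A ((k : Int) + 1) 0 - PySem.List.pyGetD A k 0)
        (List.range ((A.length : Int) - 1).toNat)
      = (A.zip A.tail).map (fun p => p.2 - p.1) := by
  apply List.ext_getElem
  · simp
  · intro k h1 h2
    have hk : k < A.length - 1 := by simpa using h1
    simp only [List.getElem_map, List.getElem_range, List.getElem_zip]
    rw [show ((k : Int) + 1) = ((k + 1 : Nat) : Int) by push_cast; ring]
    rw [PySem.List.pyGetD_natCast, PySem.List.pyGetD_natCast]
    rw [List.getD_eq_getElem _ _ (by omega), List.getD_eq_getElem _ _ (by omega)]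
    simp [List.getElem_tail]

theorem max?_getD (l : List Int) : (PySem.List.max? l (fun y => y)).getD 0 = mxOf l := by
  cases l with
  | nil => simp [PySem.List.max?, mxOf]
  | cons x t =>
    rw [PySem.List.max?_id_cons]
    rfl

-- ===== VERDICT (by name: the statement is the Claim_ definition above) =====
theorem func_spec : Claim_equal_func := by
  intro A _
  unfold Spec_func func func_alt
  by_cases hl : A.length ≤ 1
  · rw [if_pos hl, if_pos hl]
  · simp only [hl, if_false, PySem.List.slice_from_one]
    -- A side: reduce the indexed fold to maxRun of the difference list
    rw [PySem.List.pyRange_one]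
    rw [List.foldl_map]
    set dl := List.map (fun k : Nat => PySem.List.pyGetD A ((k : Int) + 1) 0 - PySem.List.pyGetD A k 0)
        (List.range ((A.length : Int) - 1).toNat) with hdl
    have hstep : (List.range ((A.length : Int) - 1).toNat).foldl
        (fun (s : Int × Int × Int) (k : Nat) =>
          let diff := PySem.List.pyGetD A ((1 : Int) + k) 0 - PySem.List.pyGetD A ((1 : Int) + k - 1) 0
          if diff = s.2.1 then (max s.1 (s.2.2 + 1), s.2.1, s.2.2 + 1)
          else (max s.1 1, diff, 1)) (0, 0, 0)
        = dl.foldl aStep (0, 0, 0) := by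
      rw [hdl, List.foldl_map]
      apply PySem.List.foldl_congr_mem
      intro s k _
      have e1 : (1 : Int) + k = (k : Int) + 1 := by ring
      have e2 : (k : Int) + 1 - 1 = (k : Int) := by ring
      simp only [e1, e2, aStep]
    rw [hstep]
    have hkey : (dl.foldl aStep (0, 0, 0)).1 = maxRun dl := by
      rw [foldl_aStep dl 0 0 0 le_rfl le_rfl]
      exact init_run dl
    rw [hkey, hdl, dl_eq A (by omega)]
    -- B side
    rw [bridge ((A.zip A.tail).map (fun p => p.2 - p.1)) 0]
    rw [max?_getD]
    have hg : ∀ c : List Int, (c.zip c.tail).map (fun p : Int × Int => p.2 - p.1) = gapsOf c :=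
      fun c => rfl
    rw [hg, hg]
    obtain ⟨x, xs, hxxs⟩ : ∃ x xs, gapsOf A = x :: xs := by
      cases hc : gapsOf A with
      | nil =>
        have : (A.zip A.tail).length = 0 := by
          rw [← List.length_map (f := fun p : Int × Int => p.2 - p.1), hg A, hc]; rfl
        simp [List.length_zip] at this
        omega
      | cons x xs => exact ⟨x, xs, rfl⟩
    rw [hxxs]
    have hG := G xs.length x xs le_rfl 0
    rw [zero_add] at hG
    rw [hG]
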